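-- pv_equiv track=rewrite | github.com/JoaopSilvaa/Resttaurant-Orders | src/analyze_log.py | joao_function_days
-- ===== SOURCE A (Python) =====
-- def verify_days(data):
--     days = set()
--     for order in data:
--         if order["dia"] not in days:
--             days.add(order["dia"])
--     return days
--
-- def joao_function_days(data):
--     days = verify_days(data)
--     joao_days = set()
--     for order in data:
--         if order["cliente"] == "joao":
--             if order["dia"] not in joao_days:
--                 joao_days.add(order["dia"])
--
--     return days.difference(joao_days)
-- ===== SOURCE B (Python) =====
-- def joao_function_days(data):
--     flags = {}
--     for order in data:
--         day = order["dia"]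
--         flags[day] = flags.get(day, False) or (order["cliente"] == "joao")
--     return {day for day, has_joao in flags.items() if not has_joao}
-- ===== Notes on version B (the rewrite author's own statement) =====
-- stated objective: simpler
-- what changed: A builds two sets in two separate passes over the orders (all days, then joao's days) and returns their set difference; B makes one pass maintaining a dict from day to a has-joao-order boolean and returns the days whose flag is false.
import Mathlib
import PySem

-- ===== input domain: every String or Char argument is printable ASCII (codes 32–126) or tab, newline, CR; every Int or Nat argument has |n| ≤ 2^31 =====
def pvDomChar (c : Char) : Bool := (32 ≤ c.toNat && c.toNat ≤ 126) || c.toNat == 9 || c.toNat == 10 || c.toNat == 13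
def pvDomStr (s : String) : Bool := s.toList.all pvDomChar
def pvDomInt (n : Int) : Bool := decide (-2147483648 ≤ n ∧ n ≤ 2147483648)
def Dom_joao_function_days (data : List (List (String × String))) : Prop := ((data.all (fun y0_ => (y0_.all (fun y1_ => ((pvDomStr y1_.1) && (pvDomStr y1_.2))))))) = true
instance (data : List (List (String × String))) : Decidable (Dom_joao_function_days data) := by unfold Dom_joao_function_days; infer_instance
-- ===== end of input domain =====

-- B replaces A's two set-building passes plus set difference by one pass keeping a day→has-joao-order dict, then a filter (objective: simpler).
-- Outputs are Python sets; both ports list the days in first-occurrence order.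

-- ===== PORT A =====
-- order["k"]: first-match lookup in the order dict; total form, exact under Pre_ (key present)
def pvKey (o : List (String × String)) (k : String) : String := (PySem.Dict.mk o).getD k ""

-- helper verify_days of A
def verify_days (data : List (List (String × String))) : List String :=
  data.foldl (fun days o =>
    if PySem.Set.contains days (pvKey o "dia") then days
    else PySem.Set.add days (pvKey o "dia")) PySem.Set.empty

def joao_function_days (data : List (List (String × String))) : List String :=
  let days := verify_days data
  let joao_days := data.foldl (fun jd o =>
    if pvKey o "cliente" == "joao" then
      (if PySem.Set.contains jd (pvKey o "dia") then jd
       else PySem.Set.add jd (pvKey o "dia"))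
    else jd) PySem.Set.empty
  PySem.Set.diff days joao_days

-- ===== PORT B =====
def joao_function_days_alt (data : List (List (String × String))) : List String :=
  let flags : PySem.Dict String Bool := data.foldl (fun d o =>
    d.insert (pvKey o "dia") (d.getD (pvKey o "dia") false || (pvKey o "cliente" == "joao"))) PySem.Dict.empty
  PySem.Set.ofList ((flags.items.filter (fun p => !p.2)).map (·.1))

-- ===== PRECONDITION & SPEC =====
-- Pre_ excludes exactly the inputs where the Python A raises KeyError: an order missing key "dia" or "cliente".
def Pre_joao_function_days (data : List (List (String × String))) : Prop :=
  (data.all (fun o => (PySem.Dict.mk o).contains "dia" && (PySem.Dict.mk o).contains "cliente")) = true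
instance (data : List (List (String × String))) : Decidable (Pre_joao_function_days data) := by unfold Pre_joao_function_days; infer_instance
def pvWitness_joao_function_days : (List (List (String × String))) :=
  [[("dia", "seg"), ("cliente", "joao")], [("dia", "ter"), ("cliente", "ana")]]

def Spec_joao_function_days (data : List (List (String × String))) (out : List String) : Prop := out = joao_function_days_alt data
instance (data : List (List (String × String))) (out : List String) : Decidable (Spec_joao_function_days data out) := by unfold Spec_joao_function_days; infer_instance

-- ===== CLAIM (what is proved, stated in full; the proofs are below) =====
def Claim_equal_joao_function_days : Prop := ∀ (data : List (List (String × String))), Dom_joao_function_days data → Pre_joao_function_days data → Spec_joao_function_days data (joao_function_days data)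

-- ===== LEMMAS AND PROOFS =====

-- A's days step (and the inner joao add) is Set.add
lemma days_step_eq_add (days : List String) (day : String) :
    (if PySem.Set.contains days day then days else PySem.Set.add days day)
      = PySem.Set.add days day := by
  simp only [PySem.Set.add, PySem.Set.contains]
  by_cases h : days.contains day = true <;> simp

-- membership flag after one joao step, in add form
lemma joao_add_contains (jd : List String) (day x : String) (j : Bool) :
    PySem.Set.contains (if j then PySem.Set.add jd day else jd) x
      = (PySem.Set.contains jd x || (j && (x == day))) := by
  cases j with
  | false => simp
  | true =>
    simp only [if_true, PySem.Set.contains, PySem.Set.add, Bool.true_and]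
    by_cases hc : jd.contains day = true
    · have hd : day ∈ jd := by simpa using hc
      by_cases hx : x = day
      · subst hx; simp [hd]
      · have hb : (x == day) = false := by simpa using hx
        simp [hd, hb]
    · have hd' : day ∉ jd := by simpa using hc
      by_cases hx : x = day
      · subst hx; simp [hd']
      · have hb : (x == day) = false := by simpa using hx
        simp [hd', hb]
        exact fun he => absurd he hx

lemma mem_add (days : List String) (day x : String) :
    x ∈ PySem.Set.add days day ↔ x ∈ days ∨ x = day := by
  by_cases h : days.contains day = true <;> simp_all [PySem.Set.add]

lemma nodup_add (days : List String) (day : String) (h : days.Nodup) :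
    (PySem.Set.add days day).Nodup := by
  by_cases hc : days.contains day = true <;>
    simp_all [PySem.Set.add, List.nodup_append]
  intro a ha he; subst he; exact hc ha

-- the dict's keys are exactly the days list
lemma keys_flag (days joao : List String) (d : PySem.Dict String Bool)
    (hI : d.items = days.map (fun x => (x, PySem.Set.contains joao x))) :
    d.keys = days := by
  simp [PySem.Dict.keys, hI, List.map_map, Function.comp_def]

lemma contains_flag (days joao : List String) (d : PySem.Dict String Bool)
    (hI : d.items = days.map (fun x => (x, PySem.Set.contains joao x))) (y : String) :
    d.contains y = PySem.Set.contains days y := by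
  rw [PySem.Dict.contains_eq_decide_mem_keys, keys_flag days joao d hI]
  by_cases h : y ∈ days <;> simp [PySem.Set.contains, h]

lemma getD_flag (days joao : List String) (d : PySem.Dict String Bool)
    (hI : d.items = days.map (fun x => (x, PySem.Set.contains joao x)))
    (hsub : ∀ x, PySem.Set.contains joao x = true → PySem.Set.contains days x = true)
    (hnd : days.Nodup) (x : String) :
    d.getD x false = PySem.Set.contains joao x := by
  have hkeys : d.keys = days := keys_flag days joao d hI
  by_cases hx : x ∈ days
  · have hmem : (x, PySem.Set.contains joao x) ∈ d.items := by
      rw [hI]; exact List.mem_map_of_mem hx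
    exact PySem.Dict.getD_of_mem_items d hmem (by rw [hkeys]; exact hnd) false
  · have hc : d.contains x = false := by
      rw [contains_flag days joao d hI]
      simpa [PySem.Set.contains] using hx
    rw [PySem.Dict.getD_of_not_contains d false hc]
    by_cases hj : PySem.Set.contains joao x = true
    · exact absurd (by simpa [PySem.Set.contains] using hsub x hj) hx
    · simpa using (Bool.not_eq_true _).mp hj |>.symm

-- the main loop invariant: after any prefix of the orders, B's flags dict lists
-- exactly A's seen days (first-occurrence order), each paired with its joao flag
lemma main_inv (data : List (List (String × String))) :
    ∀ (days joao : List String) (d : PySem.Dict String Bool),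
    d.items = days.map (fun x => (x, PySem.Set.contains joao x)) →
    (∀ x, PySem.Set.contains joao x = true → PySem.Set.contains days x = true) →
    days.Nodup →
    ((data.foldl (fun d o =>
        d.insert (pvKey o "dia") (d.getD (pvKey o "dia") false || (pvKey o "cliente" == "joao"))) d).items
      = (data.foldl (fun days o =>
          if PySem.Set.contains days (pvKey o "dia") then days
          else PySem.Set.add days (pvKey o "dia")) days).map
          (fun x => (x, PySem.Set.contains (data.foldl (fun jd o =>
            if pvKey o "cliente" == "joao" then
              (if PySem.Set.contains jd (pvKey o "dia") then jd
               else PySem.Set.add jd (pvKey o "dia"))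
            else jd) joao) x)) ∧
     (∀ x, PySem.Set.contains (data.foldl (fun jd o =>
            if pvKey o "cliente" == "joao" then
              (if PySem.Set.contains jd (pvKey o "dia") then jd
               else PySem.Set.add jd (pvKey o "dia"))
            else jd) joao) x = true →
           PySem.Set.contains (data.foldl (fun days o =>
          if PySem.Set.contains days (pvKey o "dia") then days
          else PySem.Set.add days (pvKey o "dia")) days) x = true) ∧
     (data.foldl (fun days o =>
          if PySem.Set.contains days (pvKey o "dia") then days
          else PySem.Set.add days (pvKey o "dia")) days).Nodup) := by
  induction data with
  | nil => intro days joao d hI hsub hnd; exact ⟨hI, hsub, hnd⟩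
  | cons o rest ih =>
    intro days joao d hI hsub hnd
    set day := pvKey o "dia" with hday
    set j := (pvKey o "cliente" == "joao") with hj
    simp only [List.foldl_cons]
    rw [days_step_eq_add days day, days_step_eq_add joao day]
    have hgetD := getD_flag days joao d hI hsub hnd
    have hcont := contains_flag days joao d hI
    -- the three one-step facts
    have hstep1 :
        (d.insert day (d.getD day false || j)).items
          = (PySem.Set.add days day).map
              (fun x => (x, PySem.Set.contains (if j then PySem.Set.add joao day else joao) x)) := by
      by_cases hc : PySem.Set.contains days day = true
      · have hdc : d.contains day = true := by rw [hcont day]; exact hc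
        have hdays : PySem.Set.add days day = days := by
          have hm : day ∈ days := by simpa [PySem.Set.contains] using hc
          simp [PySem.Set.add, hm]
        rw [PySem.Dict.items_insert_of_contains d _ hdc, hdays, hI, List.map_map]
        apply List.map_congr_left
        intro x _
        simp only [Function.comp_apply]
        rw [joao_add_contains joao day x j, hgetD day]
        by_cases hx : x = day
        · subst hx; simp
        · simp [hx]
      · have hdc : d.contains day = false := by rw [hcont day]; simpa using hc
        have hdmem : day ∉ days := by simpa [PySem.Set.contains] using hc
        have hdays : PySem.Set.add days day = days ++ [day] := by
          simp [PySem.Set.add, hdmem]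
        have hjd : PySem.Set.contains joao day = false := by
          by_cases h : PySem.Set.contains joao day = true
          · exact absurd (hsub day h) hc
          · simpa using h
        rw [PySem.Dict.items_insert_of_not_contains d _ hdc, hdays, hI, List.map_append]
        congr 1
        · apply List.map_congr_left
          intro x hx
          rw [joao_add_contains joao day x j]
          have hxd : (x == day) = false := by
            simp only [beq_eq_false_iff_ne, ne_eq]
            intro he; exact hdmem (he ▸ hx)
          simp [hxd]
        · simp only [List.map_cons, List.map_nil]
          rw [hgetD day, joao_add_contains joao day day j, hjd]
          simp
    have hstep2 : ∀ x, PySem.Set.contains (if j then PySem.Set.add joao day else joao) x = true →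
        PySem.Set.contains (PySem.Set.add days day) x = true := by
      intro x hx
      rw [joao_add_contains joao day x j] at hx
      simp only [Bool.or_eq_true, Bool.and_eq_true, beq_iff_eq] at hx
      simp only [PySem.Set.contains, List.contains_iff_mem]
      rcases hx with hx | ⟨_, hx⟩
      · have : x ∈ days := by
          simpa [PySem.Set.contains] using hsub x (by simpa [PySem.Set.contains] using hx)
        exact (mem_add days day x).mpr (Or.inl this)
      · exact (mem_add days day x).mpr (Or.inr hx)
    have hstep3 : (PySem.Set.add days day).Nodup := nodup_add days day hnd
    exact ih _ _ _ hstep1 hstep2 hstep3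

-- folding Set.add over fresh duplicate-free elements appends them
lemma foldl_add_of_nodup (xs : List String) :
    ∀ (s : List String), (s ++ xs).Nodup → xs.foldl PySem.Set.add s = s ++ xs := by
  induction xs with
  | nil => intro s _; simp
  | cons x xs ih =>
    intro s h
    have hx : x ∉ s := fun hm => (List.disjoint_of_nodup_append h) hm (List.mem_cons_self)
    have hstep : PySem.Set.add s x = s ++ [x] := by
      simp [PySem.Set.add, hx]
    rw [List.foldl_cons, hstep, ih (s ++ [x]) (by simpa using h)]
    simp

-- Set.ofList of a duplicate-free list is that list
lemma ofList_of_nodup (xs : List String) (h : xs.Nodup) : PySem.Set.ofList xs = xs := by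
  simpa using foldl_add_of_nodup xs [] (by simpa using h)

-- ===== VERDICT (by name: the statement is the Claim_ definition above) =====
theorem joao_function_days_spec : Claim_equal_joao_function_days := by
  intro data _ _
  unfold Spec_joao_function_days joao_function_days joao_function_days_alt verify_days
  dsimp only
  obtain ⟨hI, hsub, hnd⟩ := main_inv data PySem.Set.empty PySem.Set.empty PySem.Dict.empty rfl
    (fun x hx => by simp [PySem.Set.contains, PySem.Set.empty] at hx) (by simp [PySem.Set.empty])
  rw [hI, List.filter_map, List.map_map]
  simp only [Function.comp_def]
  rw [List.map_id', ofList_of_nodup _ (hnd.filter _)]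
  rfl
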